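-- pv_equiv track=rewrite | github.com/wkeymis/Basic_Programming | Python_part/Dodana_solutions_2024-2025/Series08/Blood types.py | bloodgroup_parent
-- ===== SOURCE A (Python) =====
-- from itertools import product
--
-- def bloodgroup_child(parent1, parent2):
--     def get_abo_combinations(abo1, abo2):
--         abo_genes = {
--             'A': ['A', 'O'],
--             'B': ['B', 'O'],
--             'AB': ['A', 'B'],
--             'O': ['O']
--         }
--         return {abo_to_group.get(a1 + a2, a1 + a2) for a1, a2 in product(abo_genes[abo1], abo_genes[abo2])}
--
--     def get_rhesus_combinations(rhesus1, rhesus2):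
--         rhesus_genes = {
--             '+': ['+', '-'],
--             '-': ['-']
--         }
--         return {'+' if '+' in combo else '-' for combo in product(rhesus_genes[rhesus1], rhesus_genes[rhesus2])}
--
--     abo_to_group = {
--         'AA': 'A', 'AO': 'A', 'OA': 'A',
--         'BB': 'B', 'BO': 'B', 'OB': 'B',
--         'AB': 'AB', 'BA': 'AB',
--         'OO': 'O'
--     }
--
--     abo1, rhesus1 = parent1[:-1], parent1[-1]
--     abo2, rhesus2 = parent2[:-1], parent2[-1]
--
--     possible_abo = get_abo_combinations(abo1, abo2)
--     possible_rhesus = get_rhesus_combinations(rhesus1, rhesus2)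
--
--     return {abo + rhesus for abo, rhesus in product(possible_abo, possible_rhesus)}
--
-- def bloodgroup_parent(known_parent, child):
--     all_groups = ['A+', 'A-', 'B+', 'B-', 'AB+', 'AB-', 'O+', 'O-']
--     possible_parents = set()
--
--     for group in all_groups:
--         possible_children = bloodgroup_child(known_parent, group)
--         if child in possible_children:
--             possible_parents.add(group)
--
--     return possible_parents
-- ===== SOURCE B (Python) =====
-- def bloodgroup_parent(known_parent, child):
--     # Invert the inheritance instead of generating every candidate's child set.
--     abo_alleles = {'A': ['A', 'O'], 'B': ['B', 'O'], 'AB': ['A', 'B'], 'O': ['O']}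
--     combine = {'AA': 'A', 'AO': 'A', 'OA': 'A', 'BB': 'B', 'BO': 'B', 'OB': 'B',
--                'AB': 'AB', 'BA': 'AB', 'OO': 'O'}
--     rh_alleles = {'+': ['+', '-'], '-': ['-']}
--
--     parent_abo = abo_alleles[known_parent[:-1]]   # KeyError on an invalid known parent
--     parent_rh = rh_alleles[known_parent[-1:]]
--
--     child_abo, child_rh = child[:-1], child[-1:]
--     if child_abo not in abo_alleles or child_rh not in ('+', '-'):
--         return set()
--
--     # ABO alleles the other parent could contribute to yield the child's ABO group
--     needed = {x for x in ('A', 'B', 'O')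
--               if any(combine[p + x] == child_abo for p in parent_abo)}
--     # Rh: a '-' child is reachable from any pair (every Rh group carries a '-' allele);
--     # a '+' child needs a '+' allele from one side.
--     rh_options = ['+', '-'] if (child_rh == '-' or '+' in parent_rh) else ['+']
--
--     return {g + r for g, al in abo_alleles.items() if any(x in needed for x in al)
--                   for r in rh_options}
-- ===== Notes on version B (the rewrite author's own statement) =====
-- stated objective: alternative
-- what changed: B inverts the inheritance rules - it derives which ABO allele the other parent must contribute and whether a '+' Rh allele is required, then builds the result set directly from the allele tables - instead of A's generate-and-test loop that computes every candidate group's full child set and tests membership.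
import Mathlib
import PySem

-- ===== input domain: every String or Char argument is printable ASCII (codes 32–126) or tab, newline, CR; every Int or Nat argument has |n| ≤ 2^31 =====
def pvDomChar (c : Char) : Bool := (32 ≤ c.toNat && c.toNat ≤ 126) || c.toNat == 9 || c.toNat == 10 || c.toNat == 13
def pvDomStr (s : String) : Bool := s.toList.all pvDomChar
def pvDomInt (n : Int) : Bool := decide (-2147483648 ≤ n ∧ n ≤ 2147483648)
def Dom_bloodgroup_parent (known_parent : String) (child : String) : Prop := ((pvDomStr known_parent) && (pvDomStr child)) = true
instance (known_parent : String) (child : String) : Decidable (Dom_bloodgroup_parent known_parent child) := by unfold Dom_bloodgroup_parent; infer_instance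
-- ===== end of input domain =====

-- B inverts the inheritance (which alleles the other parent must supply) instead of
-- generating each candidate's full child set and testing membership; objective: alternative.

-- Python string concatenation s + t (exact: concatenation of code points)
def pvCat (s t : String) : String := String.ofList (s.toList ++ t.toList)

-- ===== PORT A =====
def pvAboToGroup : PySem.Dict String String := PySem.Dict.mk
  [("AA","A"),("AO","A"),("OA","A"),("BB","B"),("BO","B"),("OB","B"),("AB","AB"),("BA","AB"),("OO","O")]
def pvAboGenes : PySem.Dict String (List String) := PySem.Dict.mk
  [("A",["A","O"]),("B",["B","O"]),("AB",["A","B"]),("O",["O"])]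
def pvRhesusGenes : PySem.Dict String (List String) := PySem.Dict.mk
  [("+",["+","-"]),("-",["-"])]

def pvGetAboCombinations? (abo1 abo2 : String) : Option (PySem.Set String) :=
  match PySem.Dict.get? pvAboGenes abo1, PySem.Dict.get? pvAboGenes abo2 with
  | some g1, some g2 =>
      some (PySem.Set.ofList (g1.flatMap (fun a1 => g2.map (fun a2 =>
        PySem.Dict.getD pvAboToGroup (pvCat a1 a2) (pvCat a1 a2)))))
  | _, _ => none

def pvGetRhesusCombinations? (r1 r2 : String) : Option (PySem.Set String) :=
  match PySem.Dict.get? pvRhesusGenes r1, PySem.Dict.get? pvRhesusGenes r2 with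
  | some g1, some g2 =>
      some (PySem.Set.ofList (g1.flatMap (fun c1 => g2.map (fun c2 =>
        if c1 = "+" ∨ c2 = "+" then "+" else "-"))))
  | _, _ => none

def pvBloodgroupChild? (parent1 parent2 : String) : Option (PySem.Set String) :=
  match PySem.Str.pyGet? parent1 (-1), PySem.Str.pyGet? parent2 (-1) with
  | some r1, some r2 =>
    let abo1 := PySem.Str.slice parent1 none (some (-1))
    let abo2 := PySem.Str.slice parent2 none (some (-1))
    match pvGetAboCombinations? abo1 abo2,
          pvGetRhesusCombinations? (String.ofList [r1]) (String.ofList [r2]) with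
    | some pa, some pr =>
        some (PySem.Set.ofList (pa.flatMap (fun a => pr.map (fun r => pvCat a r))))
    | _, _ => none
  | _, _ => none

def bloodgroup_parent (known_parent : String) (child : String) : List String :=
  let allGroups := ["A+","A-","B+","B-","AB+","AB-","O+","O-"]
  allGroups.foldl (fun acc g =>
    match pvBloodgroupChild? known_parent g with
    | some possibleChildren =>
        if PySem.Set.contains possibleChildren child then PySem.Set.add acc g else acc
    | none => acc) PySem.Set.empty

-- ===== PORT B =====
def pvAboAlleles : PySem.Dict String (List String) := PySem.Dict.mk
  [("A",["A","O"]),("B",["B","O"]),("AB",["A","B"]),("O",["O"])]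
def pvCombine : PySem.Dict String String := PySem.Dict.mk
  [("AA","A"),("AO","A"),("OA","A"),("BB","B"),("BO","B"),("OB","B"),("AB","AB"),("BA","AB"),("OO","O")]
def pvRhAlleles : PySem.Dict String (List String) := PySem.Dict.mk
  [("+",["+","-"]),("-",["-"])]

def bloodgroup_parent_alt (known_parent : String) (child : String) : List String :=
  match PySem.Dict.get? pvAboAlleles (PySem.Str.slice known_parent none (some (-1))),
        PySem.Dict.get? pvRhAlleles (PySem.Str.slice known_parent (some (-1)) none) with
  | some parentAbo, some parentRh =>
    let childAbo := PySem.Str.slice child none (some (-1))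
    let childRh := PySem.Str.slice child (some (-1)) none
    if ¬ PySem.Dict.contains pvAboAlleles childAbo = true ∨ ¬ (childRh = "+" ∨ childRh = "-") then
      PySem.Set.empty
    else
      let needed : PySem.Set String := PySem.Set.ofList (["A","B","O"].filter (fun x =>
        parentAbo.any (fun p => PySem.Dict.getD pvCombine (pvCat p x) "" == childAbo)))
      let rhOptions := if childRh = "-" ∨ parentRh.contains "+" then ["+","-"] else ["+"]
      PySem.Set.ofList
        ((pvAboAlleles.items.filter (fun gal => gal.2.any (fun x => PySem.Set.contains needed x))).flatMap
          (fun gal => rhOptions.map (fun r => pvCat gal.1 r)))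
  | _, _ => []   -- unreachable under Pre_ (Python raises KeyError here)

-- ===== PRECONDITION & SPEC =====
-- Pre_ excludes exactly the known_parent strings outside the eight valid blood groups:
-- there A raises (KeyError / IndexError on ''), returning no value.
def Pre_bloodgroup_parent (known_parent : String) (child : String) : Prop :=
  known_parent = "A+" ∨ known_parent = "A-" ∨ known_parent = "B+" ∨ known_parent = "B-" ∨
  known_parent = "AB+" ∨ known_parent = "AB-" ∨ known_parent = "O+" ∨ known_parent = "O-"
instance (known_parent : String) (child : String) : Decidable (Pre_bloodgroup_parent known_parent child) := by
  unfold Pre_bloodgroup_parent; infer_instance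

def pvWitness_bloodgroup_parent : String × String := ("O-", "A+")

def Spec_bloodgroup_parent (known_parent : String) (child : String) (out : List String) : Prop := out = bloodgroup_parent_alt known_parent child
instance (known_parent : String) (child : String) (out : List String) : Decidable (Spec_bloodgroup_parent known_parent child out) := by unfold Spec_bloodgroup_parent; infer_instance

-- ===== CLAIM (what is proved, stated in full; the proofs are below) =====
def Claim_equal_bloodgroup_parent : Prop := ∀ (known_parent : String) (child : String), Dom_bloodgroup_parent known_parent child → Pre_bloodgroup_parent known_parent child → Spec_bloodgroup_parent known_parent child (bloodgroup_parent known_parent child)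

-- ===== LEMMAS AND PROOFS =====

-- Any string is its slice s[:-1] followed by its slice s[-1:].
lemma pv_recompose (s : String) :
    s = String.ofList ((PySem.Str.slice s none (some (-1))).toList ++ (PySem.Str.slice s (some (-1)) none).toList) := by
  conv_lhs => rw [← String.ofList_toList (s := s)]
  congr 1
  simp only [PySem.Str.toList_slice, PySem.Chars.slice_eq_listSlice,
    PySem.List.slice_to_neg_one, PySem.List.slice_from_neg_one]
  rw [List.dropLast_eq_take, List.take_append_drop]

-- If s[:-1] = t and s[-1:] = u then s is t followed by u.
lemma pv_recompose_eq {s t u : String}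
    (h1 : PySem.Str.slice s none (some (-1)) = t)
    (h2 : PySem.Str.slice s (some (-1)) none = u) :
    s = String.ofList (t.toList ++ u.toList) := by
  rw [← h1, ← h2]; exact pv_recompose s

-- A's loop adds nothing when the child is in none of the generated child sets.
lemma pv_foldl_skip (kp child : String) (gs acc : List String)
    (hsub : ∀ g ∈ gs, ∀ x ∈ (pvBloodgroupChild? kp g).getD [], x ≠ child) :
    gs.foldl (fun acc g =>
      match pvBloodgroupChild? kp g with
      | some possibleChildren =>
          if PySem.Set.contains possibleChildren child then PySem.Set.add acc g else acc
      | none => acc) acc = acc := by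
  induction gs generalizing acc with
  | nil => rfl
  | cons g gs ih =>
    simp only [List.foldl_cons]
    have hstep : (match pvBloodgroupChild? kp g with
      | some possibleChildren =>
          if PySem.Set.contains possibleChildren child then PySem.Set.add acc g else acc
      | none => acc) = acc := by
      cases hp : pvBloodgroupChild? kp g with
      | none => rfl
      | some pc =>
        have hne : ∀ x ∈ pc, x ≠ child := by
          intro x hx
          exact hsub g (by simp) x (by simpa [hp] using hx)
        have hcm : child ∉ pc := fun hmem => hne child hmem rfl
        simp [PySem.Set.contains, hcm]
    rw [hstep]
    exact ih acc (fun g hg => hsub g (by simp [hg]))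

-- For a valid known parent, every generated child is one of the eight groups; so an
-- unrecognised child is in none of them.
lemma pv_sub (kp child : String)
    (hG : ∀ g ∈ (["A+","A-","B+","B-","AB+","AB-","O+","O-"] : List String),
        ∀ x ∈ (pvBloodgroupChild? kp g).getD [],
          x = "A+" ∨ x = "A-" ∨ x = "B+" ∨ x = "B-" ∨ x = "AB+" ∨ x = "AB-" ∨ x = "O+" ∨ x = "O-")
    (hch : ¬ (child = "A+" ∨ child = "A-" ∨ child = "B+" ∨ child = "B-" ∨
              child = "AB+" ∨ child = "AB-" ∨ child = "O+" ∨ child = "O-")) :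
    ∀ g ∈ (["A+","A-","B+","B-","AB+","AB-","O+","O-"] : List String),
      ∀ x ∈ (pvBloodgroupChild? kp g).getD [], x ≠ child := by
  intro g hg x hx he
  exact hch (he ▸ hG g hg x hx)

-- B's child guard fires on an unrecognised child.
lemma pv_guard (child : String)
    (hch : ¬ (child = "A+" ∨ child = "A-" ∨ child = "B+" ∨ child = "B-" ∨
              child = "AB+" ∨ child = "AB-" ∨ child = "O+" ∨ child = "O-")) :
    ¬ PySem.Dict.contains pvAboAlleles (PySem.Str.slice child none (some (-1))) = true ∨
    ¬ (PySem.Str.slice child (some (-1)) none = "+" ∨ PySem.Str.slice child (some (-1)) none = "-") := by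
  by_cases hc : PySem.Dict.contains pvAboAlleles (PySem.Str.slice child none (some (-1))) = true
  · right
    intro hrh
    have habo : "A" = PySem.Str.slice child none (some (-1)) ∨
        "B" = PySem.Str.slice child none (some (-1)) ∨
        "AB" = PySem.Str.slice child none (some (-1)) ∨
        "O" = PySem.Str.slice child none (some (-1)) := by
      simpa [pvAboAlleles] using hc
    rcases habo with h|h|h|h <;> rcases hrh with h'|h' <;>
      exact hch (by rw [pv_recompose_eq h.symm h']; decide)
  · left; exact hc

-- The two sides agree on every unrecognised child (both are empty).
lemma pv_invalid_child (kp child : String) (hpre : Pre_bloodgroup_parent kp child)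
    (hch : ¬ (child = "A+" ∨ child = "A-" ∨ child = "B+" ∨ child = "B-" ∨
              child = "AB+" ∨ child = "AB-" ∨ child = "O+" ∨ child = "O-")) :
    bloodgroup_parent kp child = bloodgroup_parent_alt kp child := by
  rcases hpre with rfl|rfl|rfl|rfl|rfl|rfl|rfl|rfl
  · have hB : bloodgroup_parent_alt "A+" child = [] := by
      unfold bloodgroup_parent_alt
      rw [show PySem.Dict.get? pvAboAlleles (PySem.Str.slice "A+" none (some (-1))) = some ["A","O"] from by decide,
          show PySem.Dict.get? pvRhAlleles (PySem.Str.slice "A+" (some (-1)) none) = some ["+","-"] from by decide]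
      simp only []
      rw [if_pos (pv_guard child hch)]
      rfl
    rw [hB]
    unfold bloodgroup_parent
    exact pv_foldl_skip "A+" child _ _ (pv_sub "A+" child (by decide) hch)
  · have hB : bloodgroup_parent_alt "A-" child = [] := by
      unfold bloodgroup_parent_alt
      rw [show PySem.Dict.get? pvAboAlleles (PySem.Str.slice "A-" none (some (-1))) = some ["A","O"] from by decide,
          show PySem.Dict.get? pvRhAlleles (PySem.Str.slice "A-" (some (-1)) none) = some ["-"] from by decide]
      simp only []
      rw [if_pos (pv_guard child hch)]
      rfl
    rw [hB]
    unfold bloodgroup_parent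
    exact pv_foldl_skip "A-" child _ _ (pv_sub "A-" child (by decide) hch)
  · have hB : bloodgroup_parent_alt "B+" child = [] := by
      unfold bloodgroup_parent_alt
      rw [show PySem.Dict.get? pvAboAlleles (PySem.Str.slice "B+" none (some (-1))) = some ["B","O"] from by decide,
          show PySem.Dict.get? pvRhAlleles (PySem.Str.slice "B+" (some (-1)) none) = some ["+","-"] from by decide]
      simp only []
      rw [if_pos (pv_guard child hch)]
      rfl
    rw [hB]
    unfold bloodgroup_parent
    exact pv_foldl_skip "B+" child _ _ (pv_sub "B+" child (by decide) hch)
  · have hB : bloodgroup_parent_alt "B-" child = [] := by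
      unfold bloodgroup_parent_alt
      rw [show PySem.Dict.get? pvAboAlleles (PySem.Str.slice "B-" none (some (-1))) = some ["B","O"] from by decide,
          show PySem.Dict.get? pvRhAlleles (PySem.Str.slice "B-" (some (-1)) none) = some ["-"] from by decide]
      simp only []
      rw [if_pos (pv_guard child hch)]
      rfl
    rw [hB]
    unfold bloodgroup_parent
    exact pv_foldl_skip "B-" child _ _ (pv_sub "B-" child (by decide) hch)
  · have hB : bloodgroup_parent_alt "AB+" child = [] := by
      unfold bloodgroup_parent_alt
      rw [show PySem.Dict.get? pvAboAlleles (PySem.Str.slice "AB+" none (some (-1))) = some ["A","B"] from by decide,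
          show PySem.Dict.get? pvRhAlleles (PySem.Str.slice "AB+" (some (-1)) none) = some ["+","-"] from by decide]
      simp only []
      rw [if_pos (pv_guard child hch)]
      rfl
    rw [hB]
    unfold bloodgroup_parent
    exact pv_foldl_skip "AB+" child _ _ (pv_sub "AB+" child (by decide) hch)
  · have hB : bloodgroup_parent_alt "AB-" child = [] := by
      unfold bloodgroup_parent_alt
      rw [show PySem.Dict.get? pvAboAlleles (PySem.Str.slice "AB-" none (some (-1))) = some ["A","B"] from by decide,
          show PySem.Dict.get? pvRhAlleles (PySem.Str.slice "AB-" (some (-1)) none) = some ["-"] from by decide]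
      simp only []
      rw [if_pos (pv_guard child hch)]
      rfl
    rw [hB]
    unfold bloodgroup_parent
    exact pv_foldl_skip "AB-" child _ _ (pv_sub "AB-" child (by decide) hch)
  · have hB : bloodgroup_parent_alt "O+" child = [] := by
      unfold bloodgroup_parent_alt
      rw [show PySem.Dict.get? pvAboAlleles (PySem.Str.slice "O+" none (some (-1))) = some ["O"] from by decide,
          show PySem.Dict.get? pvRhAlleles (PySem.Str.slice "O+" (some (-1)) none) = some ["+","-"] from by decide]
      simp only []
      rw [if_pos (pv_guard child hch)]
      rfl
    rw [hB]
    unfold bloodgroup_parent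
    exact pv_foldl_skip "O+" child _ _ (pv_sub "O+" child (by decide) hch)
  · have hB : bloodgroup_parent_alt "O-" child = [] := by
      unfold bloodgroup_parent_alt
      rw [show PySem.Dict.get? pvAboAlleles (PySem.Str.slice "O-" none (some (-1))) = some ["O"] from by decide,
          show PySem.Dict.get? pvRhAlleles (PySem.Str.slice "O-" (some (-1)) none) = some ["-"] from by decide]
      simp only []
      rw [if_pos (pv_guard child hch)]
      rfl
    rw [hB]
    unfold bloodgroup_parent
    exact pv_foldl_skip "O-" child _ _ (pv_sub "O-" child (by decide) hch)

-- ===== VERDICT (by name: the statement is the Claim_ definition above) =====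
theorem bloodgroup_parent_spec : Claim_equal_bloodgroup_parent := by
  intro kp child _ hpre
  unfold Spec_bloodgroup_parent
  by_cases hch : child = "A+" ∨ child = "A-" ∨ child = "B+" ∨ child = "B-" ∨
      child = "AB+" ∨ child = "AB-" ∨ child = "O+" ∨ child = "O-"
  · rcases hpre with rfl|rfl|rfl|rfl|rfl|rfl|rfl|rfl <;>
      rcases hch with rfl|rfl|rfl|rfl|rfl|rfl|rfl|rfl <;> decide
  · exact pv_invalid_child kp child hpre hch
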